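-- pv_equiv track=rewrite | github.com/ShihabXSarar/A.-Puzzles | D. I Love 1543.py | count_1543
-- ===== SOURCE A (Python) =====
-- def count_occurrences(layer, target):
--     extended_layer = layer + layer[:len(target) - 1]
--     count = 0
--     for i in range(len(extended_layer) - len(target) + 1):
--         if extended_layer[i:i+len(target)] == target:
--             count += 1
--     return count
--
-- def extract_layers(n, m, carpet):
--     layers = []
--     sr, er, sc, ec = 0, n - 1, 0, m - 1
--
--     while sr <= er and sc <= ec:
--         layer = ""
--         for j in range(sc, ec + 1):
--             layer += carpet[sr][j]
--         for i in range(sr + 1, er):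
--             layer += carpet[i][ec]
--         if sr < er:
--             for j in range(ec, sc - 1, -1):
--                 layer += carpet[er][j]
--         if sc < ec:
--             for i in range(er - 1, sr, -1):
--                 layer += carpet[i][sc]
--         layers.append(layer)
--         sr, er, sc, ec = sr + 1, er - 1, sc + 1, ec - 1
--     return layers
--
-- def count_1543(t, cases):
--     target = "1543"
--     results = []
--     for n, m, carpet in cases:
--         layers = extract_layers(n, m, carpet)
--         total = 0
--         for layer in layers:
--             total += count_occurrences(layer, target)
--         results.append(total)
--     return results
-- ===== SOURCE B (Python) =====
-- # Onion-peeling recursion on actual trimmed sub-grids (no index bookkeeping),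
-- # with a zip-based cyclic pattern count.
--
-- def _ring_count(ring):
--     ext = ring + ring[:3]
--     return sum(a == '1' and b == '5' and c == '4' and d == '3'
--                for a, b, c, d in zip(ext, ext[1:], ext[2:], ext[3:]))
--
-- def _peel(g):
--     if not g or not g[0]:
--         return 0
--     top, rest = g[0], g[1:]
--     if not rest:
--         ring = top
--     elif len(top) == 1:
--         ring = top + ''.join(r[0] for r in rest)
--     else:
--         mid = rest[:-1]
--         ring = (top
--                 + ''.join(r[-1] for r in mid)
--                 + rest[-1][::-1]
--                 + ''.join(r[0] for r in reversed(mid)))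
--     inner = [r[1:-1] for r in rest[:-1]]
--     return _ring_count(ring) + _peel(inner)
--
-- def count_1543(t, cases):
--     return [_peel([row[:m] for row in carpet[:n]]) if n > 0 and m > 0 else 0
--             for n, m, carpet in cases]
-- ===== Notes on version B (the rewrite author's own statement) =====
-- stated objective: alternative
-- what changed: Replaces the four-index (sr,er,sc,ec) while-loop that collects all layers of the original grid with an onion-peeling recursion that builds the outer ring of the current trimmed sub-grid by whole-row/whole-column slices and recurses on the materialised inner sub-grid, and replaces the sliding-window slice comparison with a zip of four shifted copies of the ring.
import Mathlib
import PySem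

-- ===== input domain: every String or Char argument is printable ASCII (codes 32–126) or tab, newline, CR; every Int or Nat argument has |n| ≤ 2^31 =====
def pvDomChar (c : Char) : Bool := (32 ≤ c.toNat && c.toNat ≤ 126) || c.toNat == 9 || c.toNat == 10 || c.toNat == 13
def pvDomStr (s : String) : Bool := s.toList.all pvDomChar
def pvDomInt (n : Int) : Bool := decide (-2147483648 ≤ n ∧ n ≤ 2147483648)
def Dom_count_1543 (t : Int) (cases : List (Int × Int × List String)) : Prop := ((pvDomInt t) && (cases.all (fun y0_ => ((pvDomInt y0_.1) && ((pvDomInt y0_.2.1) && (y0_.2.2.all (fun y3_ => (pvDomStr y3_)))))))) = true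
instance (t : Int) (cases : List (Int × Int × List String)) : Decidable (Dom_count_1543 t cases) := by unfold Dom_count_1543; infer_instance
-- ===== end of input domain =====

-- B restructures A's four-index while-loop into an onion-peeling recursion on trimmed
-- sub-grids with a zip-based cyclic count; same cost ('alternative'), equivalence of the
-- return value is proved on Pre_ (inputs where A does not raise IndexError).

-- ===== PORT A =====
def pyOcc (layer : List Char) : Int :=
  -- count_occurrences(layer, "1543")
  let target : List Char := ['1', '5', '4', '3']
  let ext := layer ++ PySem.List.slice layer none (some ((target.length : Int) - 1))
  (PySem.List.pyRange 0 ((ext.length : Int) - (target.length : Int) + 1) 1).foldl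
    (fun count i =>
      if PySem.List.slice ext (some i) (some (i + (target.length : Int))) = target then count + 1
      else count) 0

-- extract_layers' while-loop as recursion on the same four indices
def aLayers (carpet : List (List Char)) (sr er sc ec : Int) : List (List Char) :=
  if h : sr ≤ er ∧ sc ≤ ec then
    let l1 := (PySem.List.pyRange sc (ec + 1) 1).foldl
      (fun l j => l ++ [PySem.List.pyGetD (PySem.List.pyGetD carpet sr []) j ' ']) []
    let l2 := (PySem.List.pyRange (sr + 1) er 1).foldl
      (fun l i => l ++ [PySem.List.pyGetD (PySem.List.pyGetD carpet i []) ec ' ']) l1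
    let l3 := if sr < er then
        (PySem.List.pyRange ec (sc - 1) (-1)).foldl
          (fun l j => l ++ [PySem.List.pyGetD (PySem.List.pyGetD carpet er []) j ' ']) l2
      else l2
    let l4 := if sc < ec then
        (PySem.List.pyRange (er - 1) sr (-1)).foldl
          (fun l i => l ++ [PySem.List.pyGetD (PySem.List.pyGetD carpet i []) sc ' ']) l3
      else l3
    l4 :: aLayers carpet (sr + 1) (er - 1) (sc + 1) (ec - 1)
  else []
termination_by (er + 1 - sr).toNat
decreasing_by omega

def count_1543 (t : Int) (cases : List (Int × Int × List String)) : List Int :=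
  cases.foldl (fun results c =>
    results ++ [(aLayers (c.2.2.map String.toList) 0 (c.1 - 1) 0 (c.2.1 - 1)).foldl
      (fun total layer => total + pyOcc layer) 0]) []

-- ===== PORT B =====
-- sum over zip(ext, ext[1:], ext[2:], ext[3:]) of the four character tests
def zip4Count (ext : List Char) : Int :=
  (ext.zip ((ext.drop 1).zip ((ext.drop 2).zip (ext.drop 3)))).foldl
    (fun acc q =>
      acc + (if q.1 = '1' ∧ q.2.1 = '5' ∧ q.2.2.1 = '4' ∧ q.2.2.2 = '3' then 1 else 0)) 0

def ringCount (ring : List Char) : Int := zip4Count (ring ++ ring.take 3)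

-- _peel: ring of the current trimmed grid by whole-row/column slices, recurse on the inner grid
-- (g[1:] is `rest`, rest[:-1] is .dropLast, g[-1][::-1] is .reverse, r[1:-1] is (drop 1).dropLast,
--  r[0]/r[-1] are headD/getLastD — each the Lean function corresponding to that Python slice/index)
def bPeel (g : List (List Char)) : Int :=
  match g with
  | [] => 0
  | top :: rest =>
    if top = [] then 0
    else
      let ring :=
        if rest = [] then top
        else if top.length = 1 then top ++ rest.map (fun r => r.headD ' ')
        else
          top ++ rest.dropLast.map (fun r => r.getLastD ' ')
              ++ (rest.getLastD []).reverse
              ++ rest.dropLast.reverse.map (fun r => r.headD ' ')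
      ringCount ring + bPeel (rest.dropLast.map (fun r => (r.drop 1).dropLast))
termination_by g.length
decreasing_by simp

def count_1543_alt (t : Int) (cases : List (Int × Int × List String)) : List Int :=
  cases.map (fun c =>
    if 0 < c.1 ∧ 0 < c.2.1 then
      bPeel ((c.2.2.take c.1.toNat).map (fun row => row.toList.take c.2.1.toNat))
    else 0)

-- ===== PRECONDITION & SPEC =====
-- Pre_ excludes exactly the inputs where A raises IndexError: a case with positive n, m whose
-- carpet has fewer than n rows or a row among the first n shorter than m.
def Pre_count_1543 (t : Int) (cases : List (Int × Int × List String)) : Prop :=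
  ∀ c ∈ cases, (c.1 ≤ 0 ∨ c.2.1 ≤ 0) ∨
    (c.1 ≤ (c.2.2.length : Int) ∧ ∀ row ∈ c.2.2.take c.1.toNat, c.2.1 ≤ (row.toList.length : Int))
instance (t : Int) (cases : List (Int × Int × List String)) : Decidable (Pre_count_1543 t cases) := by
  unfold Pre_count_1543; infer_instance

def pvWitness_count_1543 : Int × (List (Int × Int × List String)) := (1, [(2, 2, ["15", "34"])])

def Spec_count_1543 (t : Int) (cases : List (Int × Int × List String)) (out : List Int) : Prop :=
  out = count_1543_alt t cases
instance (t : Int) (cases : List (Int × Int × List String)) (out : List Int) : Decidable (Spec_count_1543 t cases out) := by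
  unfold Spec_count_1543; infer_instance

-- ===== CLAIM (what is proved, stated in full; the proofs are below) =====
def Claim_equal_count_1543 : Prop := ∀ (t : Int) (cases : List (Int × Int × List String)), Dom_count_1543 t cases → Pre_count_1543 t cases → Spec_count_1543 t cases (count_1543 t cases)


-- ===== LEMMAS AND PROOFS =====

-- proof-side view of B's grids: the sub-grid of `carpet` between rows sr..er and columns sc..ec
def rowSeg (carpet : List (List Char)) (i sc ec : Int) : List Char :=
  ((PySem.List.pyGetD carpet i []).drop sc.toNat).take (ec + 1 - sc).toNat

def subGrid (carpet : List (List Char)) (sr er sc ec : Int) : List (List Char) :=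
  (PySem.List.pyRange sr (er + 1) 1).map (fun i => rowSeg carpet i sc ec)

-- reference count of '1543' windows, shared by both counting lemmas
def cnt (l : List Char) : Nat :=
  match l with
  | a :: b :: c :: d :: t =>
      (if a = '1' ∧ b = '5' ∧ c = '4' ∧ d = '3' then 1 else 0) + cnt (b :: c :: d :: t)
  | _ => 0
termination_by l.length
decreasing_by simp

lemma map_getD_range {α : Type} (xs : List α) (d : α) (a b : Int)
    (h0 : 0 ≤ a) (hb : b ≤ (xs.length : Int)) :
    (PySem.List.pyRange a b 1).map (fun j => PySem.List.pyGetD xs j d)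
      = (xs.drop a.toNat).take (b - a).toNat := by
  apply List.ext_getElem
  · simp [PySem.List.length_pyRange_one]; omega
  · intro k h1 h2
    have hk : k < (b - a).toNat := by
      simpa [PySem.List.length_pyRange_one] using h1
    simp only [List.getElem_map, PySem.List.getElem_pyRange_one]
    rw [PySem.List.pyGetD_eq_getElem xs d (by omega) (by omega)]
    rw [List.getElem_take, List.getElem_drop]
    congr 1
    omega

lemma map_f_getD_range {α β : Type} (xs : List α) (d : α) (f : α → β) (a b : Int)
    (h0 : 0 ≤ a) (hb : b ≤ (xs.length : Int)) :
    (PySem.List.pyRange a b 1).map (fun j => f (PySem.List.pyGetD xs j d))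
      = ((xs.drop a.toNat).take (b - a).toNat).map f := by
  rw [← map_getD_range xs d a b h0 hb, List.map_map]; rfl

lemma zip4Count_eq_cnt (ext : List Char) : zip4Count ext = (cnt ext : Int) := by
  suffices h : ∀ l : List Char,
      ((l.zip ((l.drop 1).zip ((l.drop 2).zip (l.drop 3)))).map
        (fun q => (if q.1 = '1' ∧ q.2.1 = '5' ∧ q.2.2.1 = '4' ∧ q.2.2.2 = '3' then (1 : Int) else 0))).sum
        = (cnt l : Int) by
    unfold zip4Count
    rw [PySem.List.foldl_add]
    simpa using h ext
  intro l
  induction l using cnt.induct with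
  | case1 a b c d t ih =>
    rw [cnt]
    push_cast
    rw [← ih]
    simp [List.zip_cons_cons]
  | case2 x h =>
    match x with
    | [] => simp [cnt]
    | [a] => simp [cnt]
    | [a, b] => simp [cnt]
    | [a, b, c] => simp [cnt]
    | a :: b :: c :: d :: t => exact absurd rfl (h a b c d t)

lemma countP_slice_eq_cnt (ext : List Char) :
    ((PySem.List.pyRange 0 ((ext.length : Int) - 4 + 1) 1).countP
      (fun i => decide (PySem.List.slice ext (some i) (some (i + 4)) = ['1', '5', '4', '3'])))
      = cnt ext := by
  have norm : ∀ l : List Char,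
      ((PySem.List.pyRange 0 ((l.length : Int) - 4 + 1) 1).countP
        (fun i => decide (PySem.List.slice l (some i) (some (i + 4)) = ['1', '5', '4', '3'])))
      = (List.range (l.length - 3)).countP
          (fun j => decide ((l.drop j).take 4 = ['1', '5', '4', '3'])) := by
    intro l
    by_cases hl : l.length ≤ 3
    · rw [PySem.List.pyRange_one_eq_nil (by omega)]
      rw [show l.length - 3 = 0 from by omega]
      simp
    · rw [show (l.length : Int) - 4 + 1 = ((l.length - 3 : Nat) : Int) from by omega]
      rw [PySem.List.pyRange_one (a := 0)]
      rw [List.countP_map]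
      apply List.countP_congr
      intro j hj
      simp only [Function.comp_apply, zero_add]
      rw [show ((j : Int) + 4) = ((j + 4 : Nat) : Int) from by push_cast; ring]
      rw [PySem.List.slice_natCast]
      rw [show j + 4 - j = 4 from by omega]
  rw [norm]
  induction ext using cnt.induct with
  | case1 a b c d t ih =>
    rw [cnt, ← ih]
    have hlen : (a :: b :: c :: d :: t).length - 3 = ((b :: c :: d :: t).length - 3) + 1 := by
      simp
    rw [hlen, List.range_succ_eq_map, List.countP_cons, List.countP_map]
    have h0 : (((a :: b :: c :: d :: t).drop 0).take 4 = ['1', '5', '4', '3'])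
        ↔ (a = '1' ∧ b = '5' ∧ c = '4' ∧ d = '3') := by
      simp
    have hcongr : ((List.range ((b :: c :: d :: t).length - 3)).countP
          ((fun j => decide (((a :: b :: c :: d :: t).drop j).take 4 = ['1', '5', '4', '3'])) ∘ Nat.succ))
        = (List.range ((b :: c :: d :: t).length - 3)).countP
          (fun j => decide (((b :: c :: d :: t).drop j).take 4 = ['1', '5', '4', '3'])) := by
      apply List.countP_congr
      intro j hj
      simp [List.drop_succ_cons]
    rw [hcongr]
    by_cases hm : a = '1' ∧ b = '5' ∧ c = '4' ∧ d = '3'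
    · simp [hm]
      omega
    · simp [hm]
  | case2 x h =>
    match x with
    | [] => simp [cnt]
    | [a] => simp [cnt]
    | [a, b] => simp [cnt]
    | [a, b, c] => simp [cnt]
    | a :: b :: c :: d :: t => exact absurd rfl (h a b c d t)

lemma pyOcc_eq_ringCount (l : List Char) : pyOcc l = ringCount l := by
  unfold pyOcc ringCount
  rw [zip4Count_eq_cnt]
  have htgt : ((['1', '5', '4', '3'] : List Char).length : Int) = 4 := by simp
  simp only [htgt]
  rw [show (4 : Int) - 1 = ((3 : Nat) : Int) from by norm_num]
  rw [PySem.List.slice_to_natCast]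
  rw [PySem.List.foldl_ite_add_one]
  rw [countP_slice_eq_cnt (l ++ l.take 3)]
  simp

lemma rowSeg_length (carpet : List (List Char)) (i sc ec : Int) (h0 : 0 ≤ sc)
    (hec : ec < ((PySem.List.pyGetD carpet i []).length : Int)) :
    (rowSeg carpet i sc ec).length = (ec + 1 - sc).toNat := by
  simp [rowSeg]; omega

lemma rowSeg_headD (carpet : List (List Char)) (i sc ec : Int) (h0 : 0 ≤ sc) (hse : sc ≤ ec)
    (hec : ec < ((PySem.List.pyGetD carpet i []).length : Int)) :
    (rowSeg carpet i sc ec).headD ' ' = PySem.List.pyGetD (PySem.List.pyGetD carpet i []) sc ' ' := by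
  have hl : sc.toNat < (PySem.List.pyGetD carpet i []).length := by omega
  unfold rowSeg
  rw [List.drop_eq_getElem_cons hl]
  rw [show (ec + 1 - sc).toNat = (ec - sc).toNat + 1 from by omega]
  rw [List.take_succ_cons]
  rw [PySem.List.pyGetD_eq_getElem _ ' ' h0 (by omega)]
  rfl

lemma rowSeg_getLastD (carpet : List (List Char)) (i sc ec : Int) (h0 : 0 ≤ sc) (hse : sc ≤ ec)
    (hec : ec < ((PySem.List.pyGetD carpet i []).length : Int)) :
    (rowSeg carpet i sc ec).getLastD ' ' = PySem.List.pyGetD (PySem.List.pyGetD carpet i []) ec ' ' := by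
  have hlen := rowSeg_length carpet i sc ec h0 hec
  have hpos : 0 < (rowSeg carpet i sc ec).length := by omega
  rw [List.getLastD_eq_getLast?, List.getLast?_eq_getElem?]
  rw [hlen]
  unfold rowSeg
  rw [List.getElem?_take_of_lt (by omega)]
  rw [List.getElem?_drop]
  rw [List.getElem?_eq_getElem (by omega)]
  rw [PySem.List.pyGetD_eq_getElem _ ' ' (by omega) (by omega)]
  simp only [Option.getD_some]
  congr 1
  omega

lemma rowSeg_singleton (carpet : List (List Char)) (i sc : Int) (h0 : 0 ≤ sc)
    (hec : sc < ((PySem.List.pyGetD carpet i []).length : Int)) :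
    rowSeg carpet i sc sc = [(rowSeg carpet i sc sc).headD ' '] := by
  have hlen := rowSeg_length carpet i sc sc h0 hec
  rw [show (sc + 1 - sc).toNat = 1 from by omega] at hlen
  obtain ⟨x, hx⟩ := List.length_eq_one_iff.mp hlen
  rw [hx]
  rfl

lemma rowSeg_inner (carpet : List (List Char)) (i sc ec : Int) (h0 : 0 ≤ sc) (hse : sc < ec)
    (hec : ec < ((PySem.List.pyGetD carpet i []).length : Int)) :
    ((rowSeg carpet i sc ec).drop 1).dropLast = rowSeg carpet i (sc + 1) (ec - 1) := by
  unfold rowSeg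
  rw [List.drop_take, List.drop_drop]
  rw [List.dropLast_eq_take]
  rw [List.length_take, List.length_drop]
  rw [List.take_take]
  rw [show (sc + 1).toNat = sc.toNat + 1 from by omega]
  congr 1
  omega

lemma bPeel_zero (g : List (List Char)) (h : ∀ r ∈ g, r = []) : bPeel g = 0 := by
  cases g with
  | nil => rw [bPeel]
  | cons top rest =>
    have htop : top = [] := h top (by simp)
    rw [bPeel]; simp [htop]

lemma bPeel_nil : bPeel ([] : List (List Char)) = 0 := by
  rw [bPeel]

lemma bPeel_cons2 (top : List Char) (rest : List (List Char)) (h : top ≠ []) :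
    bPeel (top :: rest)
      = ringCount (if rest = [] then top
          else if top.length = 1 then top ++ rest.map (fun r => r.headD ' ')
          else top ++ rest.dropLast.map (fun r => r.getLastD ' ')
              ++ (rest.getLastD []).reverse
              ++ rest.dropLast.reverse.map (fun r => r.headD ' '))
        + bPeel (rest.dropLast.map (fun r => (r.drop 1).dropLast)) := by
  rw [bPeel]
  simp [h]

lemma main_lemma (k : Nat) : ∀ (carpet : List (List Char)) (sr er sc ec : Int),
    (er + 1 - sr).toNat ≤ k →
    0 ≤ sc →
    (∀ i : Int, sr ≤ i → i ≤ er →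
      0 ≤ i ∧ i < (carpet.length : Int) ∧ ec < ((PySem.List.pyGetD carpet i []).length : Int)) →
    ((aLayers carpet sr er sc ec).map pyOcc).sum = bPeel (subGrid carpet sr er sc ec) := by
  induction k with
  | zero =>
    intro carpet sr er sc ec hk _ _
    rw [aLayers, dif_neg (by omega)]
    rw [show subGrid carpet sr er sc ec = [] from by
      simp [subGrid, PySem.List.pyRange_one_eq_nil (by omega : er + 1 ≤ sr)]]
    simp [bPeel]
  | succ k ih =>
    intro carpet sr er sc ec hk hsc hrow
    by_cases h1 : sr ≤ er
    case neg =>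
      rw [aLayers, dif_neg (by omega)]
      rw [show subGrid carpet sr er sc ec = [] from by
        simp [subGrid, PySem.List.pyRange_one_eq_nil (by omega : er + 1 ≤ sr)]]
      simp [bPeel]
    by_cases h2 : sc ≤ ec
    case neg =>
      rw [aLayers, dif_neg (by tauto)]
      rw [bPeel_zero]
      · simp
      · intro r hr
        simp only [subGrid, List.mem_map] at hr
        obtain ⟨i, _, rfl⟩ := hr
        simp [rowSeg, show (ec + 1 - sc).toNat = 0 from by omega]
    -- main case: sr ≤ er and sc ≤ ec
    obtain ⟨hsr0, hsrlen, hecsr⟩ := hrow sr le_rfl h1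
    obtain ⟨her0, herlen, hecer⟩ := hrow er (by omega) le_rfl
    have hrec := ih carpet (sr + 1) (er - 1) (sc + 1) (ec - 1) (by omega) (by omega)
      (fun i hi1 hi2 => by
        obtain ⟨p0, p1, p2⟩ := hrow i (by omega) (by omega)
        exact ⟨p0, p1, by omega⟩)
    rw [aLayers, dif_pos ⟨h1, h2⟩]
    simp only [List.map_cons, List.sum_cons]
    rw [hrec]
    simp only [PySem.List.foldl_append_singleton_eq_map, List.nil_append]
    have htopseg : (PySem.List.pyRange sc (ec + 1) 1).map
        (fun j => PySem.List.pyGetD (PySem.List.pyGetD carpet sr []) j ' ') = rowSeg carpet sr sc ec := by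
      rw [map_getD_range _ ' ' sc (ec + 1) hsc (by omega)]; rfl
    have hbotseg : (PySem.List.pyRange sc (ec + 1) 1).map
        (fun j => PySem.List.pyGetD (PySem.List.pyGetD carpet er []) j ' ') = rowSeg carpet er sc ec := by
      rw [map_getD_range _ ' ' sc (ec + 1) hsc (by omega)]; rfl
    have hsub : subGrid carpet sr er sc ec
        = rowSeg carpet sr sc ec
            :: (PySem.List.pyRange (sr + 1) (er + 1) 1).map (fun i => rowSeg carpet i sc ec) := by
      unfold subGrid
      rw [PySem.List.pyRange_one_cons (by omega)]
      simp
    have htoplen : (rowSeg carpet sr sc ec).length = (ec + 1 - sc).toNat :=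
      rowSeg_length carpet sr sc ec hsc hecsr
    have htopne : rowSeg carpet sr sc ec ≠ [] := by
      intro h
      rw [h] at htoplen
      simp at htoplen
      omega
    rw [hsub, bPeel_cons2 _ _ htopne]
    rcases eq_or_lt_of_le h1 with hre | hre
    · -- single-row layer: er = sr
      subst hre
      have e1 : PySem.List.pyRange (sr + 1) sr 1 = [] := PySem.List.pyRange_one_eq_nil (by omega)
      have e2 : PySem.List.pyRange (sr + 1) (sr + 1) 1 = [] := PySem.List.pyRange_one_eq_nil (by omega)
      have e3 : PySem.List.pyRange (sr - 1) sr (-1) = [] := PySem.List.pyRange_neg_one_eq_nil (by omega)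
      have e4 : subGrid carpet (sr + 1) (sr - 1) (sc + 1) (ec - 1) = [] := by
        simp [subGrid]
      rw [e4]
      simp only [e1, e2, e3, List.map_nil, List.append_nil, if_neg (lt_irrefl sr), ite_self,
        List.dropLast_nil, htopseg, bPeel_nil]
      rw [pyOcc_eq_ringCount]
      simp
    · -- at least two rows: sr < er
      have hsplit : PySem.List.pyRange (sr + 1) (er + 1) 1
          = PySem.List.pyRange (sr + 1) er 1 ++ [er] :=
        PySem.List.pyRange_one_succ_right (by omega)
      have hrestmap : (PySem.List.pyRange (sr + 1) (er + 1) 1).map (fun i => rowSeg carpet i sc ec)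
          = (PySem.List.pyRange (sr + 1) er 1).map (fun i => rowSeg carpet i sc ec)
              ++ [rowSeg carpet er sc ec] := by
        rw [hsplit, List.map_append]; rfl
      have hrestne : (PySem.List.pyRange (sr + 1) (er + 1) 1).map (fun i => rowSeg carpet i sc ec) ≠ [] := by
        rw [hrestmap]; simp
      have hbounds : ∀ i ∈ PySem.List.pyRange (sr + 1) er 1,
          0 ≤ i ∧ ec < ((PySem.List.pyGetD carpet i []).length : Int) := by
        intro i hi
        rw [PySem.List.mem_pyRange_one] at hi
        obtain ⟨p0, p1, p2⟩ := hrow i (by omega) (by omega)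
        exact ⟨p0, p2⟩
      rw [hrestmap, List.dropLast_concat, List.getLastD_concat]
      have hrestne2 : (List.map (fun i => rowSeg carpet i sc ec) (PySem.List.pyRange (sr + 1) er 1)
          ++ [rowSeg carpet er sc ec]) ≠ [] := by simp
      rw [if_neg hrestne2, if_pos hre]
      rcases eq_or_lt_of_le h2 with hce | hce
      · -- single-column layer: ec = sc
        subst hce
        have hlen1 : (rowSeg carpet sr sc sc).length = 1 := by rw [htoplen]; omega
        rw [if_pos hlen1, if_neg (lt_irrefl sc)]
        have hbotrev : (PySem.List.pyRange sc (sc - 1) (-1)).map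
            (fun j => PySem.List.pyGetD (PySem.List.pyGetD carpet er []) j ' ')
            = [(rowSeg carpet er sc sc).headD ' '] := by
          rw [PySem.List.pyRange_neg_one_eq_reverse]
          rw [show sc - 1 + 1 = sc from by omega]
          rw [List.map_reverse, hbotseg, rowSeg_singleton carpet er sc hsc (by omega)]
          rfl
        have hcolcong : (PySem.List.pyRange (sr + 1) er 1).map
            (fun i => PySem.List.pyGetD (PySem.List.pyGetD carpet i []) sc ' ')
            = ((PySem.List.pyRange (sr + 1) er 1).map (fun i => rowSeg carpet i sc sc)).map
                (fun r => r.headD ' ') := by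
          rw [List.map_map]
          apply List.map_congr_left
          intro i hi
          obtain ⟨p0, p2⟩ := hbounds i hi
          simp only [Function.comp_apply]
          exact (rowSeg_headD carpet i sc sc hsc le_rfl p2).symm
        rw [hbotrev, hcolcong]
        have hmapcons : (((PySem.List.pyRange (sr + 1) er 1).map (fun i => rowSeg carpet i sc sc)).map
              (fun r => r.headD ' ')) ++ [(rowSeg carpet er sc sc).headD ' ']
            = (((PySem.List.pyRange (sr + 1) er 1).map (fun i => rowSeg carpet i sc sc))
                ++ [rowSeg carpet er sc sc]).map (fun r => r.headD ' ') := by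
          rw [List.map_append]; rfl
        have hinner0 : bPeel (((PySem.List.pyRange (sr + 1) er 1).map (fun i => rowSeg carpet i sc sc)).map
            (fun r => (r.drop 1).dropLast)) = 0 := by
          apply bPeel_zero
          intro r hr
          rw [List.map_map, List.mem_map] at hr
          obtain ⟨i, hi, rfl⟩ := hr
          obtain ⟨p0, p2⟩ := hbounds i hi
          simp only [Function.comp_apply]
          rw [rowSeg_singleton carpet i sc hsc p2]
          rfl
        have hrec0 : bPeel (subGrid carpet (sr + 1) (er - 1) (sc + 1) (sc - 1)) = 0 := by
          apply bPeel_zero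
          intro r hr
          simp only [subGrid, List.mem_map] at hr
          obtain ⟨i, _, rfl⟩ := hr
          simp [rowSeg]
        rw [hinner0, hrec0, htopseg, pyOcc_eq_ringCount]
        rw [List.append_assoc, hmapcons]
      · -- general layer: sr < er and sc < ec
        have hlen1 : (rowSeg carpet sr sc ec).length ≠ 1 := by rw [htoplen]; omega
        rw [if_neg hlen1, if_pos hce]
        have hbotrev : (PySem.List.pyRange ec (sc - 1) (-1)).map
            (fun j => PySem.List.pyGetD (PySem.List.pyGetD carpet er []) j ' ')
            = (rowSeg carpet er sc ec).reverse := by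
          rw [PySem.List.pyRange_neg_one_eq_reverse]
          rw [show sc - 1 + 1 = sc from by omega]
          rw [List.map_reverse, hbotseg]
        have hleftrev : (PySem.List.pyRange (er - 1) sr (-1)).map
            (fun i => PySem.List.pyGetD (PySem.List.pyGetD carpet i []) sc ' ')
            = (((PySem.List.pyRange (sr + 1) er 1).map (fun i => rowSeg carpet i sc ec)).reverse).map
                (fun r => r.headD ' ') := by
          rw [PySem.List.pyRange_neg_one_eq_reverse]
          rw [show er - 1 + 1 = er from by omega]
          rw [List.map_reverse, List.map_reverse, List.map_map]
          congr 1
          apply List.map_congr_left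
          intro i hi
          obtain ⟨p0, p2⟩ := hbounds i hi
          simp only [Function.comp_apply]
          exact (rowSeg_headD carpet i sc ec hsc (by omega) p2).symm
        have hcolcong : (PySem.List.pyRange (sr + 1) er 1).map
            (fun i => PySem.List.pyGetD (PySem.List.pyGetD carpet i []) ec ' ')
            = ((PySem.List.pyRange (sr + 1) er 1).map (fun i => rowSeg carpet i sc ec)).map
                (fun r => r.getLastD ' ') := by
          rw [List.map_map]
          apply List.map_congr_left
          intro i hi
          obtain ⟨p0, p2⟩ := hbounds i hi
          simp only [Function.comp_apply]
          exact (rowSeg_getLastD carpet i sc ec hsc (by omega) p2).symm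
        have hinner : ((PySem.List.pyRange (sr + 1) er 1).map (fun i => rowSeg carpet i sc ec)).map
              (fun r => (r.drop 1).dropLast)
            = subGrid carpet (sr + 1) (er - 1) (sc + 1) (ec - 1) := by
          unfold subGrid
          rw [show er - 1 + 1 = er from by omega, List.map_map]
          apply List.map_congr_left
          intro i hi
          obtain ⟨p0, p2⟩ := hbounds i hi
          simp only [Function.comp_apply]
          exact rowSeg_inner carpet i sc ec hsc hce p2
        rw [hbotrev, hleftrev, hcolcong, hinner, htopseg, pyOcc_eq_ringCount]

-- ===== VERDICT =====

theorem count_1543_spec : Claim_equal_count_1543 := by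
  intro t cases _ hpre
  unfold Spec_count_1543 count_1543 count_1543_alt
  rw [PySem.List.foldl_append_singleton_eq_map]
  simp only [List.nil_append]
  apply List.map_congr_left
  intro c hc
  have hpc := hpre c hc
  by_cases hnm : 0 < c.1 ∧ 0 < c.2.1
  case neg =>
    rw [if_neg hnm]
    rw [aLayers, dif_neg (fun hand => hnm ⟨by omega, by omega⟩)]
    rfl
  case pos =>
    rw [if_pos hnm]
    obtain ⟨hn, hm⟩ := hnm
    have hple : c.1 ≤ (c.2.2.length : Int)
        ∧ ∀ row ∈ c.2.2.take c.1.toNat, c.2.1 ≤ (row.toList.length : Int) := by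
      rcases hpc with (h | h) | h
      · omega
      · omega
      · exact h
    obtain ⟨hlen, hrows⟩ := hple
    have hrowB : ∀ i : Int, 0 ≤ i → i ≤ c.1 - 1 →
        0 ≤ i ∧ i < ((c.2.2.map String.toList).length : Int) ∧
          c.2.1 - 1 < ((PySem.List.pyGetD (c.2.2.map String.toList) i []).length : Int) := by
      intro i h0 h1
      have hilt : i < ((c.2.2.map String.toList).length : Int) := by
        simp only [List.length_map]; omega
      refine ⟨h0, hilt, ?_⟩
      rw [PySem.List.pyGetD_eq_getElem _ [] h0 hilt]
      rw [List.getElem_map]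
      have hmem : c.2.2[i.toNat] ∈ c.2.2.take c.1.toNat := by
        have hi : i.toNat < (c.2.2.take c.1.toNat).length := by
          simp only [List.length_take]
          omega
        have h2 := List.getElem_take (xs := c.2.2) (i := i.toNat) (j := c.1.toNat) (h := hi)
        exact h2 ▸ List.getElem_mem hi
      have := hrows _ hmem
      omega
    have hmain := main_lemma c.1.toNat (c.2.2.map String.toList) 0 (c.1 - 1) 0 (c.2.1 - 1)
      (by omega) le_rfl (fun i hi1 hi2 => hrowB i hi1 hi2)
    rw [PySem.List.foldl_add, hmain]
    have harg : subGrid (c.2.2.map String.toList) 0 (c.1 - 1) 0 (c.2.1 - 1)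
        = (c.2.2.take c.1.toNat).map (fun row => row.toList.take c.2.1.toNat) := by
      unfold subGrid rowSeg
      rw [show c.1 - 1 + 1 = c.1 from by ring]
      rw [show c.2.1 - 1 + 1 - 0 = c.2.1 from by ring]
      rw [map_f_getD_range (c.2.2.map String.toList) []
        (fun r => (r.drop (0 : Int).toNat).take c.2.1.toNat) 0 c.1 le_rfl
        (by simpa using hlen)]
      rw [show ((0 : Int)).toNat = 0 from rfl, show c.1 - 0 = c.1 from by ring]
      rw [List.drop_zero, ← List.map_take, List.map_map]
      rfl
    rw [harg]
    simp
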